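-- pv_equiv track=rewrite | github.com/JarredR092699/coalesce-mcp | src/coalesce_mcp/client.py | _classify_nodes
-- ===== SOURCE A (Python) =====
-- def _classify_nodes(node_map: dict[str, dict]) -> tuple[list, list, list]:
--     """
--     Partition nodes into (failed, skipped_or_canceled, succeeded).
--     Each list contains (node_id, node_dict) tuples.
--     """
--     failed, blocked, succeeded = [], [], []
--     for node_id, node in node_map.items():
--         status = (node.get("status") or node.get("runState") or "").lower()
--         has_error = bool(node.get("errorMessage") or node.get("error"))
--         if status == "failed" or (has_error and status != "success"):
--             failed.append((node_id, node))
--         elif status in ("skipped", "canceled", "cancelled"):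
--             blocked.append((node_id, node))
--         elif status in ("success", "succeeded", "completed"):
--             succeeded.append((node_id, node))
--     return failed, blocked, succeeded
-- ===== SOURCE B (Python) =====
-- def _classify_nodes(node_map: dict[str, dict]) -> tuple[list, list, list]:
--     """Partition nodes into (failed, skipped_or_canceled, succeeded) via three
--     independent filter passes driven by small predicates."""
--
--     def _status(node):
--         return (node.get("status") or node.get("runState") or "").lower()
--
--     def _is_failed(node):
--         has_error = bool(node.get("errorMessage") or node.get("error"))
--         return _status(node) == "failed" or (has_error and _status(node) != "success")
--
--     failed = [(k, v) for k, v in node_map.items() if _is_failed(v)]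
--     blocked = [(k, v) for k, v in node_map.items()
--                if not _is_failed(v) and _status(v) in ("skipped", "canceled", "cancelled")]
--     succeeded = [(k, v) for k, v in node_map.items()
--                  if not _is_failed(v) and _status(v) in ("success", "succeeded", "completed")]
--     return failed, blocked, succeeded
-- ===== Notes on version B (the rewrite author's own statement) =====
-- stated objective: alternative
-- what changed: Replaces the single accumulator loop with three if/elif branches by per-node predicates (_status/_is_failed) and three independent filter passes, one per output list; the elif exclusions become explicit 'not _is_failed' conjuncts.
import Mathlib
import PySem

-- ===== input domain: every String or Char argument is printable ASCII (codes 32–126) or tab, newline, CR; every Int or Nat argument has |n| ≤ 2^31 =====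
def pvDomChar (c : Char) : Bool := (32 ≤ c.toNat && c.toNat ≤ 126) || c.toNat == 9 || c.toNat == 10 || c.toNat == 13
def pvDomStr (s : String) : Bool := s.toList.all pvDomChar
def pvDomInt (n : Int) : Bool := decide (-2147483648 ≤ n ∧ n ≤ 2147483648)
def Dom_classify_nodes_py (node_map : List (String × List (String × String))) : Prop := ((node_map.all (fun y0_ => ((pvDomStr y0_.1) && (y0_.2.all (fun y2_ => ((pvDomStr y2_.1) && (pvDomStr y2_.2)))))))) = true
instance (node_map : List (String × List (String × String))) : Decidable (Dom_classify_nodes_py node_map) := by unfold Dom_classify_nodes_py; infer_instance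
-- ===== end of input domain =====

/- B replaces A's single accumulator loop (if/elif/elif) by per-node predicates and three
   independent filter passes, one per output list; same cost, different decomposition. -/


-- shared primitives: node.get(k) on a dict, and Python's truthiness-based `x or y` on strings
def nodeGet (node : List (String × String)) (k : String) : Option String :=
  (PySem.Dict.mk node).get? k

def pyOrStr (a : Option String) (b : String) : String :=
  match a with
  | some s => if s == "" then b else s
  | none => b

def pyTruthy (a : Option String) : Bool :=
  match a with
  | some s => s != ""
  | none => false

-- ===== PORT A =====
-- literal transliteration of A: one fold over the items, appending to the three
-- accumulator lists along the if/elif/elif chain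
def classify_nodes_py (node_map : List (String × List (String × String))) : (List (String × (List (String × String)))) × (List (String × (List (String × String)))) × (List (String × (List (String × String)))) :=
  node_map.foldl (fun acc kv =>
    let node := kv.2
    let status := PySem.Str.lower (pyOrStr (nodeGet node "status") (pyOrStr (nodeGet node "runState") ""))
    let has_error := pyTruthy (nodeGet node "errorMessage") || pyTruthy (nodeGet node "error")
    if status == "failed" || (has_error && status != "success") then
      (acc.1 ++ [kv], acc.2.1, acc.2.2)
    else if status == "skipped" || status == "canceled" || status == "cancelled" then
      (acc.1, acc.2.1 ++ [kv], acc.2.2)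
    else if status == "success" || status == "succeeded" || status == "completed" then
      (acc.1, acc.2.1, acc.2.2 ++ [kv])
    else acc) ([], [], [])

-- ===== PORT B =====
-- B's helpers: per-node status and failure predicates (Source B's _status / _is_failed)
def nodeStatus (node : List (String × String)) : String :=
  PySem.Str.lower (pyOrStr (nodeGet node "status") (pyOrStr (nodeGet node "runState") ""))

def nodeIsFailed (node : List (String × String)) : Bool :=
  let has_error := pyTruthy (nodeGet node "errorMessage") || pyTruthy (nodeGet node "error")
  nodeStatus node == "failed" || (has_error && nodeStatus node != "success")

-- three independent filter passes, one per result list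
def classify_nodes_py_alt (node_map : List (String × List (String × String))) : (List (String × (List (String × String)))) × (List (String × (List (String × String)))) × (List (String × (List (String × String)))) :=
  (node_map.filter (fun kv => nodeIsFailed kv.2),
   node_map.filter (fun kv => !nodeIsFailed kv.2 &&
      (nodeStatus kv.2 == "skipped" || nodeStatus kv.2 == "canceled" || nodeStatus kv.2 == "cancelled")),
   node_map.filter (fun kv => !nodeIsFailed kv.2 &&
      (nodeStatus kv.2 == "success" || nodeStatus kv.2 == "succeeded" || nodeStatus kv.2 == "completed")))

-- ===== PRECONDITION & SPEC =====
def Spec_classify_nodes_py (node_map : List (String × List (String × String))) (out : (List (String × (List (String × String)))) × (List (String × (List (String × String)))) × (List (String × (List (String × String))))) : Prop := out = classify_nodes_py_alt node_map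
instance (node_map : List (String × List (String × String))) (out : (List (String × (List (String × String)))) × (List (String × (List (String × String)))) × (List (String × (List (String × String))))) : Decidable (Spec_classify_nodes_py node_map out) := by unfold Spec_classify_nodes_py; infer_instance

-- ===== CLAIM (what is proved, stated in full; the proofs are below) =====
def Claim_equal_classify_nodes_py : Prop := ∀ (node_map : List (String × List (String × String))), Dom_classify_nodes_py node_map → Spec_classify_nodes_py node_map (classify_nodes_py node_map)

-- ===== LEMMAS AND PROOFS =====

-- the succeeded statuses are not blocked statuses (needed because A's elif chain
-- implicitly excludes the blocked set where B's third filter does not test it)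
lemma succ_not_block (s : String) (h : (s == "success" || s == "succeeded" || s == "completed") = true) :
    (s == "skipped" || s == "canceled" || s == "cancelled") = false := by
  rcases Bool.or_eq_true_iff.1 h with h' | h'
  · rcases Bool.or_eq_true_iff.1 h' with h'' | h'' <;>
      [skip; skip] <;> (rw [beq_iff_eq] at h''; subst h''; decide)
  · rw [beq_iff_eq] at h'; subst h'; decide

lemma classify_loop (l : List (String × List (String × String)))
    (a b c : List (String × List (String × String))) :
    l.foldl (fun acc kv =>
      let node := kv.2
      let status := PySem.Str.lower (pyOrStr (nodeGet node "status") (pyOrStr (nodeGet node "runState") ""))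
      let has_error := pyTruthy (nodeGet node "errorMessage") || pyTruthy (nodeGet node "error")
      if status == "failed" || (has_error && status != "success") then
        (acc.1 ++ [kv], acc.2.1, acc.2.2)
      else if status == "skipped" || status == "canceled" || status == "cancelled" then
        (acc.1, acc.2.1 ++ [kv], acc.2.2)
      else if status == "success" || status == "succeeded" || status == "completed" then
        (acc.1, acc.2.1, acc.2.2 ++ [kv])
      else acc) (a, b, c)
    = (a ++ l.filter (fun kv => nodeIsFailed kv.2),
       b ++ l.filter (fun kv => !nodeIsFailed kv.2 &&
          (nodeStatus kv.2 == "skipped" || nodeStatus kv.2 == "canceled" || nodeStatus kv.2 == "cancelled")),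
       c ++ l.filter (fun kv => !nodeIsFailed kv.2 &&
          (nodeStatus kv.2 == "success" || nodeStatus kv.2 == "succeeded" || nodeStatus kv.2 == "completed"))) := by
  induction l generalizing a b c with
  | nil => simp
  | cons kv t ih =>
    simp only [List.foldl_cons, List.filter_cons]
    by_cases h1 : nodeIsFailed kv.2 = true
    · have h1' : (nodeStatus kv.2 == "failed" ||
          ((pyTruthy (nodeGet kv.2 "errorMessage") || pyTruthy (nodeGet kv.2 "error")) &&
            nodeStatus kv.2 != "success")) = true := by
        simpa [nodeIsFailed] using h1
      simp only [nodeStatus] at h1'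
      rw [if_pos h1', ih]
      simp [h1, List.append_assoc]
    · have h1' : (PySem.Str.lower (pyOrStr (nodeGet kv.2 "status") (pyOrStr (nodeGet kv.2 "runState") "")) == "failed" ||
          ((pyTruthy (nodeGet kv.2 "errorMessage") || pyTruthy (nodeGet kv.2 "error")) &&
            PySem.Str.lower (pyOrStr (nodeGet kv.2 "status") (pyOrStr (nodeGet kv.2 "runState") "")) != "success")) = false := by
        have := h1
        simp only [nodeIsFailed, nodeStatus] at this
        simpa using this
      rw [if_neg (by simp [h1'])]
      by_cases h2 : (nodeStatus kv.2 == "skipped" || nodeStatus kv.2 == "canceled" || nodeStatus kv.2 == "cancelled") = true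
      · rw [if_pos (by simpa [nodeStatus] using h2), ih]
        have h3 : (nodeStatus kv.2 == "success" || nodeStatus kv.2 == "succeeded" || nodeStatus kv.2 == "completed") = false := by
          cases hc : (nodeStatus kv.2 == "success" || nodeStatus kv.2 == "succeeded" || nodeStatus kv.2 == "completed") with
          | false => rfl
          | true =>
            have := succ_not_block _ hc
            rw [this] at h2; exact absurd h2 (by simp)
        simp [h1, h2, h3, List.append_assoc]
      · rw [if_neg (by simpa [nodeStatus] using h2)]
        by_cases h3 : (nodeStatus kv.2 == "success" || nodeStatus kv.2 == "succeeded" || nodeStatus kv.2 == "completed") = true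
        · rw [if_pos (by simpa [nodeStatus] using h3), ih]
          simp [h1, h2, h3, List.append_assoc]
        · rw [if_neg (by simpa [nodeStatus] using h3), ih]
          simp [h1, h2, h3]

-- ===== VERDICT (by name: the statement is the Claim_ definition above) =====
theorem classify_nodes_py_spec : Claim_equal_classify_nodes_py := by
  intro nm _
  unfold Spec_classify_nodes_py classify_nodes_py classify_nodes_py_alt
  simpa using classify_loop nm [] [] []
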